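-- pv_equiv track=rewrite | github.com/Patcybermind/rf-on-a-budget--PIC16F13145-wireless-telemetry-sub-dollar-radio- | rx/fixer.py | remove_isolated_ones
-- ===== SOURCE A (Python) =====
-- def remove_isolated_ones(binary_string):
--     """
--     Remove isolated 1s (1s that have fewer than 1 adjacent 1).
--     A 1 is considered isolated if it doesn't have at least one adjacent 1.
--     """
--     chars = list(binary_string)
--     length = len(chars)
--
--     # Create a copy to mark positions for removal
--     to_remove = [False] * length
--
--     for i in range(length):
--         if chars[i] == '1':
--             # Check if this 1 has at least one adjacent 1
--             has_adjacent_one = False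
--
--             # Check left neighbor
--             if i > 0 and chars[i-1] == '1':
--                 has_adjacent_one = True
--
--             # Check right neighbor
--             if i < length - 1 and chars[i+1] == '1':
--                 has_adjacent_one = True
--
--             # If no adjacent 1s, mark for removal
--             if not has_adjacent_one:
--                 to_remove[i] = True
--
--     # Replace isolated 1s with 0s
--     for i in range(length):
--         if to_remove[i]:
--             chars[i] = '0'
--
--     return ''.join(chars)
-- ===== SOURCE B (Python) =====
-- def remove_isolated_ones(binary_string):
--     """Run-based rewrite: split the string into maximal runs of equal
--     characters; a run that is a single '1' becomes '0', every other run
--     is copied unchanged."""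
--     n = len(binary_string)
--     pieces = []
--     i = 0
--     while i < n:
--         j = i
--         while j < n and binary_string[j] == binary_string[i]:
--             j += 1
--         if binary_string[i] == '1' and j - i == 1:
--             pieces.append('0')
--         else:
--             pieces.append(binary_string[i:j])
--         i = j
--     return ''.join(pieces)
-- ===== Notes on version B (the rewrite author's own statement) =====
-- stated objective: alternative
-- what changed: Replaces the two index-based passes with a to_remove boolean array by a single run-length scan: the string is split into maximal runs of equal characters and a run that is exactly one '1' is emitted as '0'.
import Mathlib
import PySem

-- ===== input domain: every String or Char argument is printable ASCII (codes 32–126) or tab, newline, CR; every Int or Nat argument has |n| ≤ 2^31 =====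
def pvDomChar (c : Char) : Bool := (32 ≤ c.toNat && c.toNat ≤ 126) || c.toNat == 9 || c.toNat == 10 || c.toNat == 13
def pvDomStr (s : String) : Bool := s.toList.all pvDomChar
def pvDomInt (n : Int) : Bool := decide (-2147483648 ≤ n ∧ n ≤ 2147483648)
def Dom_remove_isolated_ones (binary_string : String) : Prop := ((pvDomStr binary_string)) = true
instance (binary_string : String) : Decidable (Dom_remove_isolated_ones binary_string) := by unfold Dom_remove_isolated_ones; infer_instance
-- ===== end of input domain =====

-- B replaces A's two index passes over a to_remove array by a single run-length
-- scan (a maximal run that is exactly one '1' becomes '0'); objective: alternative algorithm.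

-- ===== PORT A =====
-- Loop body of A's first pass (marking isolated 1s); chars[i], chars[i-1],
-- chars[i+1] are always in range in Python thanks to the explicit guards,
-- so getD with a dummy default is exact.
def aBody1 (chars : List Char) (length : Nat) (tr : List Bool) (i : Nat) : List Bool :=
  if chars.getD i ' ' = '1' then
    let has1 : Bool := false
    let has1 := if 0 < i ∧ chars.getD (i - 1) ' ' = '1' then true else has1
    let has1 := if i < length - 1 ∧ chars.getD (i + 1) ' ' = '1' then true else has1
    if has1 = false then tr.set i true else tr
  else tr

-- Loop body of A's second pass (replacing marked positions by '0').
def aBody2 (to_remove : List Bool) (cs : List Char) (i : Nat) : List Char :=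
  if to_remove.getD i false then cs.set i '0' else cs

def remove_isolated_ones (binary_string : String) : String :=
  let chars := binary_string.toList
  let length := chars.length
  let to_remove :=
    (List.range length).foldl (aBody1 chars length) (List.replicate length false)
  let chars2 := (List.range length).foldl (aBody2 to_remove) chars
  String.ofList chars2

-- ===== PORT B =====
-- Source B's outer while-loop: take the maximal run of characters equal to the
-- first one; a run that is exactly one '1' is emitted as '0'; recurse on the rest.
def altGo (s : List Char) : List Char :=
  match s with
  | [] => []
  | c :: rest =>
    let run := rest.takeWhile (fun d => d = c)
    let rest' := rest.dropWhile (fun d => d = c)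
    (if c = '1' ∧ run = [] then ['0'] else c :: run) ++ altGo rest'
termination_by s.length
decreasing_by
  have h := List.length_dropWhile_le (fun d => d = c) rest
  simp only [List.length_cons]
  omega

def remove_isolated_ones_alt (binary_string : String) : String :=
  String.ofList (altGo binary_string.toList)

-- ===== PRECONDITION & SPEC =====
def Spec_remove_isolated_ones (binary_string : String) (out : String) : Prop := out = remove_isolated_ones_alt binary_string
instance (binary_string : String) (out : String) : Decidable (Spec_remove_isolated_ones binary_string out) := by unfold Spec_remove_isolated_ones; infer_instance

-- ===== CLAIM (what is proved, stated in full; the proofs are below) =====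
def Claim_equal_remove_isolated_ones : Prop := ∀ (binary_string : String), Dom_remove_isolated_ones binary_string → Spec_remove_isolated_ones binary_string (remove_isolated_ones binary_string)

-- ===== LEMMAS AND PROOFS =====

-- The common reference: a single left-to-right window scan.  p records whether
-- the previous character is '1'.
def win (p : Bool) : List Char → List Char
  | [] => []
  | c :: rest =>
    (if c = '1' ∧ p = false ∧ rest.head? ≠ some '1' then '0' else c) ::
      win (decide (c = '1')) rest

-- "position i holds an isolated '1'", as A computes it
def isoB (chars : List Char) (i : Nat) : Bool :=
  (chars.getD i ' ' = '1') &&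
    !(decide (0 < i ∧ chars.getD (i - 1) ' ' = '1') ||
      decide (i < chars.length - 1 ∧ chars.getD (i + 1) ' ' = '1'))

theorem aBody1_eq (chars : List Char) (tr : List Bool) (i : Nat) :
    aBody1 chars chars.length tr i = if isoB chars i then tr.set i true else tr := by
  unfold aBody1 isoB
  by_cases hc : chars.getD i ' ' = '1' <;>
  by_cases hL : 0 < i ∧ chars.getD (i - 1) ' ' = '1' <;>
  by_cases hR : i < chars.length - 1 ∧ chars.getD (i + 1) ' ' = '1' <;>
    simp only [hc, hL, hR, if_pos, if_neg, decide_true, decide_false] <;>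
    simp [hc]

theorem fold1_length (chars : List Char) (m : Nat) :
    ((List.range m).foldl (aBody1 chars chars.length)
      (List.replicate chars.length false)).length = chars.length := by
  induction m with
  | zero => simp
  | succ m ih =>
    rw [List.range_succ, List.foldl_append, List.foldl_cons, List.foldl_nil, aBody1_eq]
    split_ifs <;> simp [ih]

theorem fold1_getD (chars : List Char) (m : Nat) (hm : m ≤ chars.length) (j : Nat) :
    ((List.range m).foldl (aBody1 chars chars.length)
      (List.replicate chars.length false)).getD j false
    = (decide (j < m) && isoB chars j) := by
  induction m with
  | zero =>
    simp only [List.range_zero, List.foldl_nil, List.getD_eq_getElem?_getD,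
      List.getElem?_replicate]
    split_ifs <;> simp
  | succ m ih =>
    have hm' : m ≤ chars.length := by omega
    have hmlt : m < chars.length := by omega
    rw [List.range_succ, List.foldl_append, List.foldl_cons, List.foldl_nil, aBody1_eq]
    have hlen := fold1_length chars m
    have hd : decide (j < m + 1) = if j = m then true else decide (j < m) := by
      by_cases h : j = m
      · subst h; simp
      · rw [if_neg h, decide_eq_decide]; omega
    split_ifs with hiso
    · by_cases hj : j = m
      · subst hj
        rw [List.getD_eq_getElem?_getD, List.getElem?_set]
        simp [hlen, hmlt, hiso]
      · rw [List.getD_eq_getElem?_getD, List.getElem?_set, if_neg (Ne.symm hj),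
          ← List.getD_eq_getElem?_getD, ih hm', hd, if_neg hj]
    · rw [ih hm', hd]
      by_cases hj : j = m
      · subst hj; simp [hiso]
      · rw [if_neg hj]

theorem fold2_length (tr : List Bool) (chars : List Char) (m : Nat) :
    ((List.range m).foldl (aBody2 tr) chars).length = chars.length := by
  induction m with
  | zero => simp
  | succ m ih =>
    rw [List.range_succ, List.foldl_append, List.foldl_cons, List.foldl_nil, aBody2]
    split_ifs <;> simp [ih]

theorem fold2_getD (tr : List Bool) (chars : List Char) (m : Nat)
    (hm : m ≤ chars.length) (j : Nat) :
    ((List.range m).foldl (aBody2 tr) chars).getD j ' '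
    = if j < m ∧ tr.getD j false = true then '0' else chars.getD j ' ' := by
  induction m with
  | zero => simp
  | succ m ih =>
    have hm' : m ≤ chars.length := by omega
    have hmlt : m < chars.length := by omega
    rw [List.range_succ, List.foldl_append, List.foldl_cons, List.foldl_nil, aBody2]
    have hlen := fold2_length tr chars m
    by_cases hset : tr.getD m false = true
    · rw [if_pos hset]
      by_cases hj : j = m
      · subst hj
        rw [List.getD_eq_getElem?_getD, List.getElem?_set, if_pos rfl, if_pos (by omega),
          if_pos ⟨by omega, hset⟩]
        rfl
      · rw [List.getD_eq_getElem?_getD, List.getElem?_set, if_neg (Ne.symm hj),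
          ← List.getD_eq_getElem?_getD, ih hm']
        by_cases hA : j < m ∧ tr.getD j false = true
        · rw [if_pos hA, if_pos ⟨by omega, hA.2⟩]
        · rw [if_neg hA, if_neg (fun h => hA ⟨by have := h.1; omega, h.2⟩)]
    · rw [if_neg hset, ih hm']
      by_cases hj : j = m
      · subst hj
        rw [if_neg (by rintro ⟨h1, _⟩; omega), if_neg (by rintro ⟨_, h2⟩; exact hset h2)]
      · by_cases hA : j < m ∧ tr.getD j false = true
        · rw [if_pos hA, if_pos ⟨by have := hA.1; omega, hA.2⟩]
        · rw [if_neg hA, if_neg (fun h => hA ⟨by have := h.1; omega, h.2⟩)]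

theorem win_length (p : Bool) (xs : List Char) : (win p xs).length = xs.length := by
  induction xs generalizing p with
  | nil => rfl
  | cons c rest ih => simp [win, ih]

theorem win_getD (xs : List Char) (p : Bool) (j : Nat) (hj : j < xs.length) :
    (win p xs).getD j ' '
    = if xs.getD j ' ' = '1' ∧ (if j = 0 then p else decide (xs.getD (j - 1) ' ' = '1')) = false
          ∧ xs[j + 1]? ≠ some '1'
      then '0' else xs.getD j ' ' := by
  induction xs generalizing p j with
  | nil => simp at hj
  | cons c rest ih =>
    cases j with
    | zero =>
      simp only [win, List.getD_cons_zero]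
      have hh : rest[0]? = rest.head? := by
        cases rest <;> simp
      simp [hh]
    | succ j =>
      have hj' : j < rest.length := by simpa using hj
      simp only [win, List.getD_cons_succ]
      rw [ih (decide (c = '1')) j hj']
      cases j with
      | zero => simp
      | succ j => simp

-- A equals the window scan with initial p = false.
theorem A_eq_win (chars : List Char) :
    (List.range chars.length).foldl
      (aBody2 ((List.range chars.length).foldl (aBody1 chars chars.length)
        (List.replicate chars.length false)))
      chars
    = win false chars := by
  set tr := (List.range chars.length).foldl (aBody1 chars chars.length)
      (List.replicate chars.length false) with htr
  apply List.ext_getElem?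
  intro j
  have hlenF := fold2_length tr chars chars.length
  have hlenW := win_length false chars
  by_cases hj : j < chars.length
  · have h1 : ((List.range chars.length).foldl (aBody2 tr) chars)[j]?
        = some (((List.range chars.length).foldl (aBody2 tr) chars).getD j ' ') := by
      rw [List.getD_eq_getElem?_getD, List.getElem?_eq_getElem (by omega)]
      rfl
    have h2 : (win false chars)[j]? = some ((win false chars).getD j ' ') := by
      rw [List.getD_eq_getElem?_getD, List.getElem?_eq_getElem (by omega)]
      rfl
    rw [h1, h2, fold2_getD tr chars chars.length le_rfl j,
      win_getD chars false j hj, htr, fold1_getD chars chars.length le_rfl j]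
    congr 1
    have hnext : (chars[j + 1]? ≠ some '1')
        ↔ ¬ (j < chars.length - 1 ∧ chars.getD (j + 1) ' ' = '1') := by
      by_cases hb : j + 1 < chars.length
      · rw [List.getElem?_eq_getElem hb]
        rw [List.getD_eq_getElem?_getD, List.getElem?_eq_getElem hb]
        constructor
        · intro h hc; exact h (by simpa using congrArg some hc.2)
        · intro h hc; exact h ⟨by omega, by simpa using hc⟩
      · rw [List.getElem?_eq_none (by omega)]
        constructor
        · intro _ hc; omega
        · intro _ hc; simp at hc
    by_cases hiso : (j < chars.length ∧ isoB chars j = true)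
    · have hx := hiso.2
      simp only [isoB, Bool.and_eq_true, Bool.not_eq_true', Bool.or_eq_false_iff,
        decide_eq_true_eq, decide_eq_false_iff_not] at hx
      obtain ⟨hc1, hL, hR⟩ := hx
      rw [if_pos (by simpa [decide_eq_true_eq] using hiso), if_pos ?_]
      refine ⟨hc1, ?_, hnext.mpr hR⟩
      cases j with
      | zero => simp
      | succ j =>
        simp only [Nat.succ_ne_zero]
        simp only [if_false, decide_eq_false_iff_not]
        exact fun h => hL ⟨Nat.succ_pos j, h⟩
    · rw [if_neg (by simpa [decide_eq_true_eq] using hiso), if_neg ?_]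
      rintro ⟨hc1, hp, hnx⟩
      apply hiso
      refine ⟨hj, ?_⟩
      simp only [isoB, Bool.and_eq_true, Bool.not_eq_true', Bool.or_eq_false_iff,
        decide_eq_true_eq, decide_eq_false_iff_not]
      refine ⟨hc1, ?_, hnext.mp hnx⟩
      cases j with
      | zero => rintro ⟨h0, _⟩; omega
      | succ j =>
        rintro ⟨_, h⟩
        simp only [Nat.succ_ne_zero] at hp
        simp only [if_false, decide_eq_false_iff_not] at hp
        exact hp h
  · rw [List.getElem?_eq_none (by omega), List.getElem?_eq_none (by omega)]

-- a run of '1's is copied verbatim when the previous character is '1'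
theorem win_run_ones (run ys : List Char) (h : ∀ d ∈ run, d = '1') :
    win true (run ++ ys) = run ++ win true ys := by
  induction run with
  | nil => simp
  | cons d t ih =>
    have hd : d = '1' := h d (List.mem_cons_self ..)
    subst hd
    have ih' := ih (fun d hd => h d (List.mem_cons_of_mem _ hd))
    simp [List.cons_append, win, ih']

-- a run of non-'1' characters is copied verbatim, with p staying false
theorem win_run_not_ones (run ys : List Char) (h : ∀ d ∈ run, d ≠ '1') :
    win false (run ++ ys) = run ++ win false ys := by
  induction run with
  | nil => simp
  | cons d t ih =>
    have hd : d ≠ '1' := h d (List.mem_cons_self ..)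
    have ih' := ih (fun d hd => h d (List.mem_cons_of_mem _ hd))
    simp [List.cons_append, win, ih', hd]

theorem altGo_eq_win : ∀ (n : Nat) (xs : List Char), xs.length ≤ n →
    ∀ (p : Bool), (p = true → xs.head? ≠ some '1') → win p xs = altGo xs := by
  intro n
  induction n with
  | zero =>
    intro xs hxs p _
    have : xs = [] := List.eq_nil_of_length_eq_zero (Nat.le_zero.mp hxs)
    subst this
    rw [altGo]
    rfl
  | succ n ih =>
    intro xs hxs p hp
    match xs with
    | [] => rw [altGo]; rfl
    | c :: rest =>
      rw [altGo]
      have hsplit : rest.takeWhile (fun d => d = c) ++ rest.dropWhile (fun d => d = c) = rest :=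
        List.takeWhile_append_dropWhile
      have hrest'len : (rest.dropWhile (fun d => d = c)).length ≤ n := by
        have := List.length_dropWhile_le (fun d => d = c) rest
        simp only [List.length_cons] at hxs
        omega
      have hruneq : ∀ d ∈ rest.takeWhile (fun d => d = c), d = c := by
        intro d hd
        have h := List.mem_takeWhile_imp hd
        simp at h
        exact h
      have hdrophead : (true = true) → (rest.dropWhile (fun d => d = c)).head? ≠ some c := by
        intro _ he
        have h := List.head?_dropWhile_not (fun d => d = c) rest
        rw [he] at h
        simpa using h
      by_cases hc : c = '1'
      · subst hc
        by_cases hrun : rest.takeWhile (fun d => d = '1') = []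
        · -- single '1': the run after c is empty
          rw [if_pos ⟨rfl, hrun⟩]
          have hresthead : rest.head? ≠ some '1' := by
            match rest with
            | [] => simp
            | r :: t =>
              simp only [List.takeWhile_cons] at hrun
              by_cases hr : r = '1'
              · simp [hr] at hrun
              · simp [hr]
          have hpf : p = false := by
            cases p
            · rfl
            · exact absurd (by simp : ('1' :: rest).head? = some '1') (hp rfl)
          have hrest : rest.dropWhile (fun d => (d = '1' : Bool)) = rest := by
            match rest with
            | [] => rfl
            | r :: t =>
              simp only [List.takeWhile_cons] at hrun
              by_cases hr : r = '1'
              · simp [hr] at hrun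
              · rw [List.dropWhile_cons, if_neg (by simp [hr])]
          have ihr := ih rest (by simp only [List.length_cons] at hxs; omega) true
            (fun _ => hresthead)
          rw [hrest]
          simp [win, hpf, hresthead, decide_true, ihr]
        · -- a run of further '1's follows
          rw [if_neg (fun h => hrun h.2)]
          obtain ⟨r, t, hrt⟩ : ∃ r t, rest.takeWhile (fun d => (d = '1' : Bool)) = r :: t := by
            match h : rest.takeWhile (fun d => (d = '1' : Bool)) with
            | [] => exact absurd h hrun
            | r :: t => exact ⟨r, t, rfl⟩
          have hresthead : rest.head? = some '1' := by
            have hs := hsplit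
            rw [hrt] at hs
            rw [← hs]
            simp [hruneq r (by rw [hrt]; exact List.mem_cons_self ..)]
          simp only [win]
          rw [if_neg (fun h => h.2.2 hresthead)]
          simp only [decide_true]
          conv_lhs => rw [← hsplit]
          rw [win_run_ones _ _ hruneq, ih _ hrest'len true (fun _ => hdrophead rfl)]
          simp
      · -- a run of non-'1' characters
        rw [if_neg (fun h => hc h.1)]
        simp only [win]
        rw [if_neg (by simp [hc]), decide_eq_false hc]
        conv_lhs => rw [← hsplit]
        rw [win_run_not_ones _ _ (fun d hd => by rw [hruneq d hd]; exact hc),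
          ih _ hrest'len false (fun h => by simp at h)]
        simp

-- ===== VERDICT (by name: the statement is the Claim_ definition above) =====
theorem remove_isolated_ones_spec : Claim_equal_remove_isolated_ones := by
  intro s _
  unfold Spec_remove_isolated_ones remove_isolated_ones remove_isolated_ones_alt
  simp only []
  rw [A_eq_win, altGo_eq_win s.toList.length s.toList le_rfl false (by simp)]
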